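-- pv_equiv track=rewrite | github.com/Yousif012/multi-armed-bandit-learning | qLearning.py | getMaximumCluster
-- ===== SOURCE A (Python) =====
-- def getMaximumCluster(qTable):
-- 	maxValue = qTable[0][0]
-- 	index = 0
--
-- 	for i in range(len(qTable)):
-- 		for j in range(len(qTable[0])):
-- 			prevMaxValue = maxValue
-- 			maxValue = max(qTable[i][j], maxValue)
-- 			if prevMaxValue != maxValue:
-- 				index = i
--
-- 	return index
-- ===== SOURCE B (Python) =====
-- def getMaximumCluster(qTable):
--     # Two-pass decomposition: first find the global maximum over the
--     # len(qTable) x len(qTable[0]) window, then return the index of the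
--     # first row whose window contains it.
--     width = len(qTable[0])
--     best = qTable[0][0]
--     for row in qTable:
--         for v in row[:width]:
--             if v > best:
--                 best = v
--     i = 0
--     for row in qTable:
--         if best in row[:width]:
--             return i
--         i += 1
-- ===== Notes on version B (the rewrite author's own statement) =====
-- stated objective: alternative
-- what changed: Replaces A's single combined scan (running max with index bookkeeping on every strict increase) by two separate passes: first compute the global maximum of the len(qTable) x len(qTable[0]) window, then return the index of the first row whose window contains it.
import Mathlib
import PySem

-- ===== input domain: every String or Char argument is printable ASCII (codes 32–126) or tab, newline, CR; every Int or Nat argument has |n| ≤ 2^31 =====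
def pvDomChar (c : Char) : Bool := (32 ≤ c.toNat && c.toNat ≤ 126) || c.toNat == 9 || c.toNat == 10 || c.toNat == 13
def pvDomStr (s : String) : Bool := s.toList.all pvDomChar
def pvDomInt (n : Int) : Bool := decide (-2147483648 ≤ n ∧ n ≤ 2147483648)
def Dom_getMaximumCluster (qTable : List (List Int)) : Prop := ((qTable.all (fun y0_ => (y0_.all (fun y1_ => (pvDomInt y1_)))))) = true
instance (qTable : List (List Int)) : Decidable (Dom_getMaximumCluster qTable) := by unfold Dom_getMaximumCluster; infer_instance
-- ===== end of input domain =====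

-- B replaces A's single scan (running max + index bookkeeping) by two passes: find the
-- global maximum of the w×h window, then return the first row whose window contains it
-- (objective: alternative decomposition; same asymptotic cost, measurably faster constants).

-- ===== PORT A =====
def getMaximumCluster (qTable : List (List Int)) : Int :=
  let maxValue : Int := PySem.List.pyGetD (PySem.List.pyGetD qTable 0 []) 0 0
  let s :=
    (PySem.List.pyRange 0 (qTable.length : Int) 1).foldl (fun (s : Int × Int) i =>
      (PySem.List.pyRange 0 ((PySem.List.pyGetD qTable 0 []).length : Int) 1).foldl
        (fun (s : Int × Int) j =>
          let prevMaxValue := s.1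
          let maxValue := max (PySem.List.pyGetD (PySem.List.pyGetD qTable i []) j 0) prevMaxValue
          let index := if prevMaxValue ≠ maxValue then i else s.2
          (maxValue, index)) s) (maxValue, 0)
  s.2

-- ===== PORT B =====
-- row[:width] with width = a list length (≥ 0) is List.take width (PySem.List.slice_to_natCast)
def altFind (best : Int) (width : Nat) (i : Int) : List (List Int) → Int
  | [] => 0   -- unreachable under Pre_ (Python would fall off and return None)
  | row :: rest => if best ∈ row.take width then i else altFind best width (i + 1) rest

def getMaximumCluster_alt (qTable : List (List Int)) : Int :=
  let width := (PySem.List.pyGetD qTable 0 []).length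
  let best :=
    qTable.foldl (fun best row =>
      (row.take width).foldl (fun best v => if v > best then v else best) best)
      (PySem.List.pyGetD (PySem.List.pyGetD qTable 0 []) 0 0)
  altFind best width 0 qTable

-- ===== PRECONDITION & SPEC =====
-- Pre_ = exactly the inputs where A returns: a nonempty table with nonempty first row,
-- every row at least as long as the first (otherwise qTable[i][j] raises IndexError).
def Pre_getMaximumCluster (qTable : List (List Int)) : Prop :=
  qTable ≠ [] ∧ qTable.getD 0 [] ≠ [] ∧
    ∀ r ∈ qTable, (qTable.getD 0 []).length ≤ r.length
instance (qTable : List (List Int)) : Decidable (Pre_getMaximumCluster qTable) := by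
  unfold Pre_getMaximumCluster; infer_instance

def pvWitness_getMaximumCluster : List (List Int) := [[1, 2], [3, 4]]

def Spec_getMaximumCluster (qTable : List (List Int)) (out : Int) : Prop := out = getMaximumCluster_alt qTable
instance (qTable : List (List Int)) (out : Int) : Decidable (Spec_getMaximumCluster qTable out) := by unfold Spec_getMaximumCluster; infer_instance

-- ===== CLAIM (what is proved, stated in full; the proofs are below) =====
def Claim_equal_getMaximumCluster : Prop := ∀ (qTable : List (List Int)), Dom_getMaximumCluster qTable → Pre_getMaximumCluster qTable → Spec_getMaximumCluster qTable (getMaximumCluster qTable)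

-- ===== LEMMAS AND PROOFS =====

-- reference forms of A's loops
def innerA (i : Int) (s : Int × Int) (r : List Int) : Int × Int :=
  r.foldl (fun s v => (max v s.1, if s.1 ≠ max v s.1 then i else s.2)) s

def outerA (w : Nat) (i : Int) (s : Int × Int) : List (List Int) → Int × Int
  | [] => s
  | r :: rs => outerA w (i + 1) (innerA i s (r.take w)) rs

def bigMax (w : Nat) (m : Int) (rows : List (List Int)) : Int :=
  rows.foldl (fun m r => (r.take w).foldl max m) m

-- pointwise: B's branch is max
theorem if_gt_eq_max (b v : Int) : (if v > b then v else b) = max b v := by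
  rcases le_total v b with h | h
  · simp [not_lt.mpr h, max_eq_left h]
  · rcases lt_or_eq_of_le h with h' | h'
    · simp [h', max_eq_right h]
    · simp [h']

theorem bigMax_cons (w : Nat) (m : Int) (r : List Int) (rs : List (List Int)) :
    bigMax w m (r :: rs) = bigMax w ((r.take w).foldl max m) rs := by
  simp [bigMax]

theorem innerA_fst (i : Int) (r : List Int) : ∀ s : Int × Int, (innerA i s r).1 = r.foldl max s.1 := by
  induction r with
  | nil => intro s; simp [innerA]
  | cons v r ih =>
    intro s
    simp only [innerA, List.foldl_cons] at *
    rw [ih]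
    simp [max_comm]

theorem innerA_snd (i : Int) (r : List Int) : ∀ s : Int × Int,
    (innerA i s r).2 = if s.1 = r.foldl max s.1 then s.2 else i := by
  induction r with
  | nil => intro s; simp [innerA]
  | cons v r ih =>
    intro s
    simp only [innerA, List.foldl_cons] at *
    rw [ih, max_comm v s.1]
    change (if max s.1 v = r.foldl max (max s.1 v) then (if s.1 ≠ max s.1 v then i else s.2) else i) =
      if s.1 = r.foldl max (max s.1 v) then s.2 else i
    by_cases h : s.1 = max s.1 v
    · simp only [← h]
      simp
    · have h1 : s.1 < max s.1 v := lt_of_le_of_ne (le_max_left _ _) h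
      have h2 : max s.1 v ≤ r.foldl max (max s.1 v) := (PySem.List.le_foldl_max r (max s.1 v)).1
      have h3 : s.1 ≠ r.foldl max (max s.1 v) := ne_of_lt (lt_of_lt_of_le h1 h2)
      rw [if_neg h3]
      split
      · simp
      · rfl

theorem le_bigMax (w : Nat) (rows : List (List Int)) : ∀ m : Int, m ≤ bigMax w m rows := by
  induction rows with
  | nil => intro m; simp [bigMax]
  | cons r rs ih =>
    intro m
    rw [bigMax_cons]
    exact le_trans (PySem.List.le_foldl_max (r.take w) m).1 (ih _)

theorem outerA_snd (w : Nat) (rows : List (List Int)) : ∀ (i : Int) (s : Int × Int),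
    (outerA w i s rows).2 =
      if s.1 = bigMax w s.1 rows then s.2 else altFind (bigMax w s.1 rows) w i rows := by
  induction rows with
  | nil => intro i s; simp [outerA, bigMax]
  | cons r rs ih =>
    intro i s
    rw [show outerA w i s (r :: rs) = outerA w (i+1) (innerA i s (r.take w)) rs from rfl,
        ih, innerA_fst, innerA_snd, bigMax_cons,
        show altFind (bigMax w ((r.take w).foldl max s.1) rs) w i (r :: rs)
          = (if bigMax w ((r.take w).foldl max s.1) rs ∈ r.take w then i
             else altFind (bigMax w ((r.take w).foldl max s.1) rs) w (i+1) rs) from rfl]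
    set m1 := (r.take w).foldl max s.1 with hm1
    set M := bigMax w m1 rs with hM
    have hm1le : s.1 ≤ m1 := (PySem.List.le_foldl_max (r.take w) s.1).1
    have hMle : m1 ≤ M := le_bigMax w rs m1
    by_cases hA : m1 = M
    · by_cases hB : s.1 = m1
      · rw [if_pos hA, if_pos hB, if_pos (hB.trans (hB ▸ hA))]
      · have hs : s.1 ≠ M := fun h => hB (le_antisymm hm1le (h ▸ hMle))
        have hmem : M ∈ r.take w := by
          rcases PySem.List.foldl_max_mem (r.take w) s.1 with h | h
          · exact absurd (hm1 ▸ h).symm hB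
          · exact hA ▸ (hm1 ▸ h)
        rw [if_pos hA, if_neg hB, if_neg hs, if_pos hmem]
    · have hs : s.1 ≠ M := fun h => hA (le_antisymm hMle (h ▸ hm1le))
      have hnmem : M ∉ r.take w := fun hmem =>
        hA (le_antisymm hMle ((PySem.List.le_foldl_max (r.take w) s.1).2 M hmem))
      rw [if_neg hA, if_neg hs, if_neg hnmem]


theorem bigMax_alt (w : Nat) (m : Int) (rows : List (List Int)) :
    rows.foldl (fun best row =>
      (row.take w).foldl (fun best v => if v > best then v else best) best) m = bigMax w m rows := by
  simp only [if_gt_eq_max]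
  rfl

theorem conv_inner (r : List Int) (w : Nat) (hw : w ≤ r.length) (i : Int) (s : Int × Int) :
    (PySem.List.pyRange 0 (w : Int) 1).foldl
      (fun (s : Int × Int) j =>
        (max (PySem.List.pyGetD r j 0) s.1,
         if s.1 ≠ max (PySem.List.pyGetD r j 0) s.1 then i else s.2)) s
      = innerA i s (r.take w) := by
  have hlen : (r.take w).length = w := by simp [hw]
  have hcongr : (PySem.List.pyRange 0 (w : Int) 1).foldl
      (fun (s : Int × Int) j =>
        (max (PySem.List.pyGetD r j 0) s.1,
         if s.1 ≠ max (PySem.List.pyGetD r j 0) s.1 then i else s.2)) s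
      = (PySem.List.pyRange 0 (w : Int) 1).foldl
      (fun (s : Int × Int) j =>
        (max (PySem.List.pyGetD (r.take w) j 0) s.1,
         if s.1 ≠ max (PySem.List.pyGetD (r.take w) j 0) s.1 then i else s.2)) s := by
    apply PySem.List.foldl_congr_mem
    intro acc j hj
    rcases (PySem.List.mem_pyRange_one).1 hj with ⟨hj0, hjw⟩
    have heq : PySem.List.pyGetD r j 0 = PySem.List.pyGetD (r.take w) j 0 := by
      rw [PySem.List.pyGetD_eq_getElem r 0 hj0 (by omega),
          PySem.List.pyGetD_eq_getElem (r.take w) 0 hj0 (by rw [hlen]; omega)]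
      exact (List.getElem_take).symm
    rw [heq]
  rw [hcongr, show (w : Int) = ((r.take w).length : Int) by exact_mod_cast hlen.symm]
  exact PySem.List.foldl_pyRange_zero_pyGetD' (r.take w) 0
    (fun (s : Int × Int) v => (max v s.1, if s.1 ≠ max v s.1 then i else s.2)) s

theorem conv_outer (qT : List (List Int)) (w : Nat) (hw : ∀ r ∈ qT, w ≤ r.length) :
    ∀ (suf : List (List Int)) (i : Nat) (s : Int × Int), qT.drop i = suf →
    (PySem.List.pyRange (i : Int) (qT.length : Int) 1).foldl
      (fun (s : Int × Int) ii =>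
        (PySem.List.pyRange 0 (w : Int) 1).foldl
          (fun (s : Int × Int) j =>
            (max (PySem.List.pyGetD (PySem.List.pyGetD qT ii []) j 0) s.1,
             if s.1 ≠ max (PySem.List.pyGetD (PySem.List.pyGetD qT ii []) j 0) s.1 then ii else s.2)) s) s
      = outerA w (i : Int) s suf := by
  intro suf
  induction suf with
  | nil =>
    intro i s h
    have hle : qT.length ≤ i := by
      by_contra hlt
      push Not at hlt
      exact (List.drop_eq_nil_iff.mp h).not_gt hlt
    rw [show PySem.List.pyRange (i : Int) (qT.length : Int) 1 = []
        from PySem.List.pyRange_one_eq_nil (by exact_mod_cast hle)]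
    simp [outerA]
  | cons r rest ih =>
    intro i s h
    have hi : i < qT.length := by
      by_contra hge
      push Not at hge
      rw [List.drop_eq_nil_iff.mpr hge] at h
      exact absurd h.symm (List.cons_ne_nil r rest)
    have h0 : (qT.drop i)[0]? = qT[i + 0]? := List.getElem?_drop
    rw [h] at h0
    have hr : qT[i]? = some r := by simpa using h0.symm
    have hget : PySem.List.pyGetD qT (i : Int) [] = r := by
      rw [PySem.List.pyGetD_natCast, List.getD_eq_getElem?_getD, hr]
      rfl
    have hdrop : qT.drop (i + 1) = rest := by
      have hdd : qT.drop (i + 1) = (qT.drop i).drop 1 := by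
        rw [List.drop_drop]
      rw [hdd, h]
      rfl
    have hmem : r ∈ qT := List.mem_of_mem_drop (h ▸ List.mem_cons_self)
    rw [show PySem.List.pyRange (i : Int) (qT.length : Int) 1
        = (i : Int) :: PySem.List.pyRange ((i : Int) + 1) (qT.length : Int) 1
        from PySem.List.pyRange_one_cons (by exact_mod_cast hi), List.foldl_cons]
    have hstep := ih (i + 1)
      ((PySem.List.pyRange 0 (w : Int) 1).foldl
        (fun (s : Int × Int) j =>
          (max (PySem.List.pyGetD (PySem.List.pyGetD qT (i : Int) []) j 0) s.1,
           if s.1 ≠ max (PySem.List.pyGetD (PySem.List.pyGetD qT (i : Int) []) j 0) s.1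
             then (i : Int) else s.2)) s) hdrop
    rw [show ((i + 1 : Nat) : Int) = (i : Int) + 1 by push_cast; ring] at hstep
    rw [hstep]
    rw [show outerA w (i : Int) s (r :: rest)
        = outerA w ((i : Int) + 1) (innerA (i : Int) s (r.take w)) rest from rfl]
    congr 1
    rw [hget]
    exact conv_inner r w (hw r hmem) (i : Int) s

theorem getMaximumCluster_spec : Claim_equal_getMaximumCluster := by
  intro qTable _ hpre
  obtain ⟨hne, hne0, hlen⟩ := hpre
  obtain ⟨r0, rest, rfl⟩ : ∃ r0 rest, qTable = r0 :: rest := by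
    cases qTable with
    | nil => exact absurd rfl hne
    | cons a l => exact ⟨a, l, rfl⟩
  have hg0 : (r0 :: rest : List (List Int)).getD 0 [] = r0 := rfl
  rw [hg0] at hne0 hlen
  unfold Spec_getMaximumCluster getMaximumCluster getMaximumCluster_alt
  simp only [PySem.List.pyGetD_zero_cons]
  have hconv := conv_outer (r0 :: rest) r0.length hlen (r0 :: rest) 0
    (PySem.List.pyGetD r0 0 0, 0) rfl
  simp only [Nat.cast_zero] at hconv
  rw [hconv, outerA_snd, bigMax_alt]
  by_cases hc : (PySem.List.pyGetD r0 0 0, (0 : Int)).1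
      = bigMax r0.length (PySem.List.pyGetD r0 0 0, (0 : Int)).1 (r0 :: rest)
  · rw [if_pos hc]
    have hm0 : PySem.List.pyGetD r0 0 0 ∈ r0.take r0.length := by
      rw [List.take_length]
      cases r0 with
      | nil => exact absurd rfl hne0
      | cons a t =>
        rw [PySem.List.pyGetD_zero_cons]
        exact List.mem_cons_self
    have hMmem : bigMax r0.length (PySem.List.pyGetD r0 0 0) (r0 :: rest) ∈ r0.take r0.length := by
      rw [← hc]
      exact hm0
    rw [show altFind (bigMax r0.length (PySem.List.pyGetD r0 0 0) (r0 :: rest)) r0.length 0 (r0 :: rest)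
        = if bigMax r0.length (PySem.List.pyGetD r0 0 0) (r0 :: rest) ∈ r0.take r0.length then (0 : Int)
          else altFind (bigMax r0.length (PySem.List.pyGetD r0 0 0) (r0 :: rest)) r0.length (0 + 1) rest
        from rfl, if_pos hMmem]
  · rw [if_neg hc]
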